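-- pv_equiv track=rewrite | github.com/LivelyFIeld1235/IntTugralFunctionStorage | main.py | isit_invalidFunction
-- ===== SOURCE A (Python) =====
-- def isit_invalidFunction(function):
--     variable_count = 0
--     ValidVAR =  ['a','b','c','d','e','f','g','h','i','j','k','l','m','n','o','p','q','r','s','t','u','v','w','x','y','z']
--     for letter in ValidVAR:
--         if letter in function:
--             variable_count += 1
--     if variable_count == 1:
--         FunctionORNOT = True
--     else:
--         FunctionORNOT = False
--     for i in function:
--         if i in ['@','#','$','%','&',':','"',"'",'<','>','?']:
--             FunctionORNOT = False
--     return FunctionORNOT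
-- ===== SOURCE B (Python) =====
-- def isit_invalidFunction(function):
--     seen = set()
--     saw_special = False
--     for c in function:
--         if 'a' <= c <= 'z':
--             seen.add(c)
--         if c in '@#$%&:"\'<>?':
--             saw_special = True
--     return len(seen) == 1 and not saw_special
-- ===== Notes on version B (the rewrite author's own statement) =====
-- stated objective: simpler
-- what changed: Replaces the 26 substring scans over the alphabet plus a second special-character loop with a single pass over the string that collects the distinct lowercase letters in a set and a saw-special flag.
import Mathlib
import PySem

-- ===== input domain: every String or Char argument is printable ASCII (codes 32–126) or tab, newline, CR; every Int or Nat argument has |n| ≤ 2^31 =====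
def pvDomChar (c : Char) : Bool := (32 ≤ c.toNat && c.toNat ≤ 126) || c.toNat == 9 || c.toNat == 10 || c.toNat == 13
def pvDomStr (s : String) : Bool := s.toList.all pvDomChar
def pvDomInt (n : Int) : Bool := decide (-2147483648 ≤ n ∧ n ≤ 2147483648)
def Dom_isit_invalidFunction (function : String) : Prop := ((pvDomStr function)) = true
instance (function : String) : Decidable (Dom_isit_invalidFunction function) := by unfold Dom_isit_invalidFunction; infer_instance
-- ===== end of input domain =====

-- B replaces A's 26 alphabet substring scans + second special-char loop by one pass
-- collecting the distinct lowercase letters in a set and a saw-special flag (objective: simpler).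

-- the special-character list shared by both Pythons (B writes it as a string literal of the same characters)
def pvSpecials : List Char := ['@', '#', '$', '%', '&', ':', '"', '\'', '<', '>', '?']

-- ===== PORT A =====
def pvValidVAR : List Char :=
  ['a','b','c','d','e','f','g','h','i','j','k','l','m','n','o','p','q','r','s','t','u','v','w','x','y','z']

def isit_invalidFunction (function : String) : Bool :=
  let cs := function.toList
  -- for letter in ValidVAR: if letter in function: variable_count += 1
  let variable_count : Int :=
    pvValidVAR.foldl (fun n letter => if PySem.Chars.isIn [letter] cs then n + 1 else n) 0
  -- FunctionORNOT = (variable_count == 1)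
  let f0 : Bool := variable_count == 1
  -- for i in function: if i in [specials]: FunctionORNOT = False
  cs.foldl (fun f i => if pvSpecials.contains i then false else f) f0

-- ===== PORT B =====
def isit_invalidFunction_alt (function : String) : Bool :=
  let st := function.toList.foldl
    (fun (p : PySem.Set Char × Bool) c =>
      (if 'a' ≤ c && c ≤ 'z' then PySem.Set.add p.1 c else p.1,
       if pvSpecials.contains c then true else p.2))
    (PySem.Set.empty, false)
  PySem.Set.len st.1 == 1 && !st.2

-- ===== PRECONDITION & SPEC =====
def Spec_isit_invalidFunction (function : String) (out : Bool) : Prop := out = isit_invalidFunction_alt function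
instance (function : String) (out : Bool) : Decidable (Spec_isit_invalidFunction function out) := by unfold Spec_isit_invalidFunction; infer_instance

-- ===== CLAIM (what is proved, stated in full; the proofs are below) =====
def Claim_equal_isit_invalidFunction : Prop := ∀ (function : String), Dom_isit_invalidFunction function → Spec_isit_invalidFunction function (isit_invalidFunction function)

-- ===== LEMMAS AND PROOFS =====

-- single-character 'in' is list membership
theorem pv_isIn_singleton (c : Char) (l : List Char) : PySem.Chars.isIn [c] l = true ↔ c ∈ l := by
  rw [PySem.Chars.isIn_iff_infix]
  constructor
  · intro h; exact h.mem (by simp)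
  · intro h; obtain ⟨l1, l2, rfl⟩ := List.append_of_mem h
    exact ⟨l1, l2, by simp⟩

theorem pv_mem_validVAR (c : Char) : c ∈ pvValidVAR ↔ ('a' ≤ c && c ≤ 'z') = true := by
  have hEq : ∀ a b : Char, a = b ↔ a.toNat = b.toNat := by
    intro a b
    constructor
    · rintro rfl; rfl
    · intro h; exact Char.ext (UInt32.toNat_inj.mp h)
  have hLe : ∀ a b : Char, (a ≤ b) ↔ a.toNat ≤ b.toNat := by
    intro a b; rw [Char.le_def]; exact UInt32.le_iff_toNat_le
  simp only [pvValidVAR, List.mem_cons, List.not_mem_nil, or_false, Bool.and_eq_true,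
    decide_eq_true_eq, hEq, hLe,
    show ('a':Char).toNat = 97 from rfl, show ('b':Char).toNat = 98 from rfl, show ('c':Char).toNat = 99 from rfl, show ('d':Char).toNat = 100 from rfl, show ('e':Char).toNat = 101 from rfl, show ('f':Char).toNat = 102 from rfl, show ('g':Char).toNat = 103 from rfl, show ('h':Char).toNat = 104 from rfl, show ('i':Char).toNat = 105 from rfl, show ('j':Char).toNat = 106 from rfl, show ('k':Char).toNat = 107 from rfl, show ('l':Char).toNat = 108 from rfl, show ('m':Char).toNat = 109 from rfl, show ('n':Char).toNat = 110 from rfl, show ('o':Char).toNat = 111 from rfl, show ('p':Char).toNat = 112 from rfl, show ('q':Char).toNat = 113 from rfl, show ('r':Char).toNat = 114 from rfl, show ('s':Char).toNat = 115 from rfl, show ('t':Char).toNat = 116 from rfl, show ('u':Char).toNat = 117 from rfl, show ('v':Char).toNat = 118 from rfl, show ('w':Char).toNat = 119 from rfl, show ('x':Char).toNat = 120 from rfl, show ('y':Char).toNat = 121 from rfl, show ('z':Char).toNat = 122 from rfl]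
  omega

-- A's second loop: sticky False = initial value && no special character seen
theorem pv_foldl_sticky (cs : List Char) (f : Bool) :
    cs.foldl (fun f i => if pvSpecials.contains i then false else f) f
      = (f && !(cs.any (fun i => pvSpecials.contains i))) := by
  induction cs generalizing f with
  | nil => simp
  | cons c cs ih =>
    simp only [List.foldl_cons, ih]
    by_cases hc : c ∈ pvSpecials <;> cases f <;> simp [hc]

-- B's flag loop is List.any
theorem pv_foldl_any (cs : List Char) (b : Bool) :
    cs.foldl (fun b c => if pvSpecials.contains c then true else b) b
      = (b || cs.any (fun c => pvSpecials.contains c)) := by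
  induction cs generalizing b with
  | nil => simp
  | cons c cs ih =>
    simp only [List.foldl_cons, ih]
    by_cases hc : c ∈ pvSpecials <;> cases b <;> simp [hc]

-- B's seen-set is set(filter lowercase cs)
theorem pv_seen_eq (cs : List Char) :
    cs.foldl (fun s c => if 'a' ≤ c && c ≤ 'z' then PySem.Set.add s c else s) PySem.Set.empty
      = PySem.Set.ofList (cs.filter (fun c => 'a' ≤ c && c ≤ 'z')) := by
  rw [PySem.Set.ofList_eq_foldl, List.foldl_filter]
  simp [PySem.Set.empty]

-- the two distinct-letter counts agree
theorem pv_count_eq (cs : List Char) :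
    (PySem.Set.ofList (cs.filter (fun c => 'a' ≤ c && c ≤ 'z'))).length
      = (pvValidVAR.filter (fun letter => PySem.Chars.isIn [letter] cs)).length := by
  apply List.Perm.length_eq
  rw [List.perm_ext_iff_of_nodup (PySem.Set.nodup_ofList _)
    (List.Nodup.filter _ (by decide))]
  intro c
  simp only [PySem.Set.mem_ofList, List.mem_filter, pv_isIn_singleton, pv_mem_validVAR]
  tauto

-- ===== VERDICT (by name: the statement is the Claim_ definition above) =====
theorem isit_invalidFunction_spec : Claim_equal_isit_invalidFunction := by
  intro function _
  show isit_invalidFunction function = isit_invalidFunction_alt function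
  simp only [isit_invalidFunction, isit_invalidFunction_alt]
  rw [PySem.List.foldl_prod_mk
      (fun (s : PySem.Set Char) (c : Char) => if 'a' ≤ c && c ≤ 'z' then PySem.Set.add s c else s)
      (fun (b : Bool) (c : Char) => if pvSpecials.contains c then true else b)]
  rw [pv_foldl_sticky, pv_foldl_any, pv_seen_eq, PySem.List.foldl_count_if]
  simp only [Bool.false_or]
  have h := pv_count_eq function.toList
  simp [PySem.Set.len, List.countP_eq_length_filter, h]
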